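-- pv_equiv track=rewrite | github.com/Angus1976/superinsight1225 | src/lineage/impact_analyzer.py | _assess_risk
-- ===== SOURCE A (Python) =====
-- from typing import Dict, Any, List, Optional, Set
-- from enum import Enum
--
-- class RiskLevel(str, Enum):
--     """Risk level for impact analysis."""
--     LOW = "low"
--     MEDIUM = "medium"
--     HIGH = "high"
--     CRITICAL = "critical"
--
-- def _assess_risk(
--
--     downstream: List[Dict[str, Any]],
--     upstream: List[Dict[str, Any]],
--     critical: List[Dict[str, Any]]
-- ) -> tuple[RiskLevel, List[str]]:
--     """Assess risk level based on impact analysis."""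
--     risk_factors = []
--
--     # Factor 1: Number of downstream dependencies
--     if len(downstream) > 50:
--         risk_factors.append(f"High downstream count: {len(downstream)} entities")
--     elif len(downstream) > 20:
--         risk_factors.append(f"Moderate downstream count: {len(downstream)} entities")
--
--     # Factor 2: Critical dependencies
--     if len(critical) > 5:
--         risk_factors.append(f"Multiple critical dependencies: {len(critical)}")
--     elif len(critical) > 0:
--         risk_factors.append(f"Has critical dependencies: {len(critical)}")
--
--     # Factor 3: Depth of impact
--     max_depth = max((e.get("depth", 0) for e in downstream), default=0)
--     if max_depth > 3:
--         risk_factors.append(f"Deep impact chain: {max_depth} levels")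
--
--     # Determine risk level
--     if len(critical) > 5 or len(downstream) > 50:
--         risk_level = RiskLevel.CRITICAL
--     elif len(critical) > 2 or len(downstream) > 20:
--         risk_level = RiskLevel.HIGH
--     elif len(critical) > 0 or len(downstream) > 5:
--         risk_level = RiskLevel.MEDIUM
--     else:
--         risk_level = RiskLevel.LOW
--
--     return risk_level, risk_factors
-- ===== SOURCE B (Python) =====
-- def _assess_risk(downstream, upstream, critical):
--     """Assess risk level based on impact analysis (table-driven re-implementation)."""
--     dn, cn = len(downstream), len(critical)
--
--     # risk factors: first matching (threshold, template) per dimension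
--     factors = []
--     for n, table in (
--         (dn, [(50, "High downstream count: {} entities"),
--               (20, "Moderate downstream count: {} entities")]),
--         (cn, [(5, "Multiple critical dependencies: {}"),
--               (0, "Has critical dependencies: {}")]),
--     ):
--         for thr, tmpl in table:
--             if n > thr:
--                 factors.append(tmpl.format(n))
--                 break
--
--     # depth factor as a separate step (running max)
--     depth = 0
--     for e in downstream:
--         depth = max(depth, e.get("depth", 0))
--     if depth > 3:
--         factors.append("Deep impact chain: {} levels".format(depth))
--
--     # risk level: numeric severity per dimension, take the max, map back
--     def tier(n, thresholds):
--         return sum(1 for t in thresholds if n > t)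
--
--     levels = ("low", "medium", "high", "critical")
--     level = levels[max(tier(dn, (5, 20, 50)), tier(cn, (0, 2, 5)))]
--     return level, factors
-- ===== Notes on version B (the rewrite author's own statement) =====
-- stated objective: alternative
-- what changed: Replaces A's sequential if/elif chains by a table-driven first-match pick for the risk factors and computes the level as the maximum of two per-dimension numeric severity tiers (threshold counts) indexed into the level table, with the depth computed as a running max from 0 instead of max(generator, default=0).
import Mathlib
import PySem

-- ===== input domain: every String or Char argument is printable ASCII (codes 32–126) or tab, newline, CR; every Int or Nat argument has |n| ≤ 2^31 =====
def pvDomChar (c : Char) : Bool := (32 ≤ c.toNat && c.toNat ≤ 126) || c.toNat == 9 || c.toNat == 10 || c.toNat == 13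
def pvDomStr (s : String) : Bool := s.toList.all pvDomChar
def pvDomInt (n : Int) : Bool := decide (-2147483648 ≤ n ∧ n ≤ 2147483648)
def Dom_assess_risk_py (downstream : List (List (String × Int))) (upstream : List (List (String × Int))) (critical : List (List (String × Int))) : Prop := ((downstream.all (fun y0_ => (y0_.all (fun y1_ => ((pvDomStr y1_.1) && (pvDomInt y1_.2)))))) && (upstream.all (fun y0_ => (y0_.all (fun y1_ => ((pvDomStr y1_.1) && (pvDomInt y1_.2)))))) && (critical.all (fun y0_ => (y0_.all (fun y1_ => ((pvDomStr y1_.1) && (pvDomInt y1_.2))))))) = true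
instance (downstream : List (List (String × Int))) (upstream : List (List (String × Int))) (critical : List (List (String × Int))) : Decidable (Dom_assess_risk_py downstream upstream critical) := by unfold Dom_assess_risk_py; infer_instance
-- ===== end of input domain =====

-- B replaces A's combined if/elif chains by table-driven factor picking and a
-- max-of-two numeric severity tiers mapped back to the level name (objective: alternative decomposition).

-- ===== PORT A =====
-- max(l, default=0) over a generator, as Python computes it (running max from the first element)
def pyMaxD (l : List Int) : Int :=
  match l with
  | [] => 0
  | x :: xs => xs.foldl max x
-- literal port of A: sequential if/elif appends, max(generator, default=0), combined if/elif level chain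
def assess_risk_py (downstream : List (List (String × Int))) (upstream : List (List (String × Int))) (critical : List (List (String × Int))) : String × List String :=
  let rf : List String := []
  let rf := if (downstream.length : Int) > 50 then
      rf ++ ["High downstream count: " ++ PySem.Int.toStr (downstream.length : Int) ++ " entities"]
    else if (downstream.length : Int) > 20 then
      rf ++ ["Moderate downstream count: " ++ PySem.Int.toStr (downstream.length : Int) ++ " entities"]
    else rf
  let rf := if (critical.length : Int) > 5 then
      rf ++ ["Multiple critical dependencies: " ++ PySem.Int.toStr (critical.length : Int)]
    else if (critical.length : Int) > 0 then
      rf ++ ["Has critical dependencies: " ++ PySem.Int.toStr (critical.length : Int)]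
    else rf
  -- max((e.get("depth", 0) for e in downstream), default=0): dict.get = first-match lookup
  let maxDepth : Int := pyMaxD (downstream.map (fun e => (List.lookup "depth" e).getD 0))
  let rf := if (3:Int) < maxDepth then
      rf ++ ["Deep impact chain: " ++ PySem.Int.toStr maxDepth ++ " levels"]
    else rf
  let risk : String :=
    if (critical.length : Int) > 5 ∨ (downstream.length : Int) > 50 then "critical"
    else if (critical.length : Int) > 2 ∨ (downstream.length : Int) > 20 then "high"
    else if (critical.length : Int) > 0 ∨ (downstream.length : Int) > 5 then "medium"
    else "low"
  (risk, rf)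

-- ===== PORT B =====
-- tier(n, thresholds) = sum(1 for t in thresholds if n > t)
def pvTier (n : Int) (ts : List Int) : Nat :=
  ts.foldl (fun a t => if n > t then a + 1 else a) 0
-- the inner 'for thr, tmpl in table: if n > thr: append; break' loop;
-- tmpl.format(n) is ported as prefix ++ str(n) ++ suffix (exact for these templates)
def pvPick (n : Int) : List (Int × String × String) → List String
  | [] => []
  | (thr, pre, suf) :: rest => if n > thr then [pre ++ PySem.Int.toStr n ++ suf] else pvPick n rest
def assess_risk_py_alt (downstream : List (List (String × Int))) (upstream : List (List (String × Int))) (critical : List (List (String × Int))) : String × List String :=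
  let dn : Int := (downstream.length : Int)
  let cn : Int := (critical.length : Int)
  let factors :=
    pvPick dn [(50, "High downstream count: ", " entities"), (20, "Moderate downstream count: ", " entities")]
    ++ pvPick cn [(5, "Multiple critical dependencies: ", ""), (0, "Has critical dependencies: ", "")]
  let depth : Int := downstream.foldl (fun acc e => max acc ((List.lookup "depth" e).getD 0)) 0
  let factors := if depth > 3 then factors ++ ["Deep impact chain: " ++ PySem.Int.toStr depth ++ " levels"] else factors
  let levels : List String := ["low", "medium", "high", "critical"]
  (levels.getD (max (pvTier dn [5, 20, 50]) (pvTier cn [0, 2, 5])) "low", factors)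

-- ===== PRECONDITION & SPEC =====
def Spec_assess_risk_py (downstream : List (List (String × Int))) (upstream : List (List (String × Int))) (critical : List (List (String × Int))) (out : String × List String) : Prop := out = assess_risk_py_alt downstream upstream critical
instance (downstream : List (List (String × Int))) (upstream : List (List (String × Int))) (critical : List (List (String × Int))) (out : String × List String) : Decidable (Spec_assess_risk_py downstream upstream critical out) := by unfold Spec_assess_risk_py; infer_instance

-- ===== CLAIM (what is proved, stated in full; the proofs are below) =====
def Claim_equal_assess_risk_py : Prop := ∀ (downstream : List (List (String × Int))) (upstream : List (List (String × Int))) (critical : List (List (String × Int))), Dom_assess_risk_py downstream upstream critical → Spec_assess_risk_py downstream upstream critical (assess_risk_py downstream upstream critical)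

-- ===== LEMMAS AND PROOFS =====

theorem pv_foldl_max_max (t : List Int) (a b : Int) :
    t.foldl max (max a b) = max a (t.foldl max b) := by
  induction t generalizing b with
  | nil => rfl
  | cons c t ih => simpa [List.foldl, max_assoc] using ih (max b c)

-- B's running max from 0 equals max 0 of A's max-of-nonempty (or 0 when empty)
theorem pv_depth_eq (d : List (List (String × Int))) :
    d.foldl (fun acc e => max acc ((List.lookup "depth" e).getD 0)) 0
      = max 0 (pyMaxD (d.map (fun e => (List.lookup "depth" e).getD 0))) := by
  rw [← List.foldl_map]
  cases d.map (fun e => (List.lookup "depth" e).getD 0) with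
  | nil => simp [pyMaxD]
  | cons x xs => simpa [pyMaxD, List.foldl] using pv_foldl_max_max xs 0 x

-- A's combined level chain equals B's max-of-tiers indexing
theorem pv_level_eq (dn cn : Int) :
    (if cn > 5 ∨ dn > 50 then "critical"
     else if cn > 2 ∨ dn > 20 then "high"
     else if cn > 0 ∨ dn > 5 then "medium"
     else "low")
    = (["low", "medium", "high", "critical"] : List String).getD
        (max (pvTier dn [5, 20, 50]) (pvTier cn [0, 2, 5])) "low" := by
  simp only [pvTier, List.foldl]
  split_ifs
  all_goals first | omega | rfl

theorem pv_down_factors (dn : Int) :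
    pvPick dn [(50, "High downstream count: ", " entities"), (20, "Moderate downstream count: ", " entities")]
    = (if dn > 50 then ["High downstream count: " ++ PySem.Int.toStr dn ++ " entities"]
       else if dn > 20 then ["Moderate downstream count: " ++ PySem.Int.toStr dn ++ " entities"]
       else []) := by
  simp only [pvPick]

theorem pv_crit_factors (cn : Int) :
    pvPick cn [(5, "Multiple critical dependencies: ", ""), (0, "Has critical dependencies: ", "")]
    = (if cn > 5 then ["Multiple critical dependencies: " ++ PySem.Int.toStr cn]
       else if cn > 0 then ["Has critical dependencies: " ++ PySem.Int.toStr cn]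
       else []) := by
  simp only [pvPick]
  split_ifs <;> simp

-- ===== VERDICT (by name: the statement is the Claim_ definition above) =====
theorem assess_risk_py_spec : Claim_equal_assess_risk_py := by
  intro d u c _
  unfold Spec_assess_risk_py
  simp only [assess_risk_py, assess_risk_py_alt]
  rw [pv_depth_eq, pv_level_eq, pv_down_factors, pv_crit_factors]
  set md : Int := pyMaxD (d.map (fun e => (List.lookup "depth" e).getD 0)) with hmd
  by_cases h : 3 < md
  · have hmx : max 0 md = md := by omega
    rw [hmx, if_pos h, if_pos h]
    split_ifs <;> simp
  · rw [if_neg h, if_neg (show ¬ ((3:Int) < max 0 md) by omega)]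
    split_ifs <;> simp
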